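-- pv_equiv track=rewrite | github.com/HeyJunie/GroupStudy | 06_13/11.py | solution
-- ===== SOURCE A (Python) =====
-- from collections import deque
--
-- def solution(n):
--     answer = ""
--     deq = deque()
--     deq.append(1)
--     L = 0
--     while deq:
--         length = len(deq)
--         for _ in range(length):
--             v = deq.popleft()
--             answer += str(v) + " "
--             for nx in [v*2, v*2+1]:
--                 if nx > n:
--                     continue
--                 deq.append(nx)
--             L += 1
--     return answer
-- ===== SOURCE B (Python) =====
-- def solution(n):
--     m = n if n > 1 else 1
--     return "".join(str(i) + " " for i in range(1, m + 1))
-- ===== Notes on version B (the rewrite author's own statement) =====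
-- stated objective: faster
-- what changed: BFS over the implicit heap tree 1..n visits nodes in increasing label order, so the deque simulation with repeated string concatenation is replaced by a single join over range(1, max(n,1)+1).
import Mathlib
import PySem

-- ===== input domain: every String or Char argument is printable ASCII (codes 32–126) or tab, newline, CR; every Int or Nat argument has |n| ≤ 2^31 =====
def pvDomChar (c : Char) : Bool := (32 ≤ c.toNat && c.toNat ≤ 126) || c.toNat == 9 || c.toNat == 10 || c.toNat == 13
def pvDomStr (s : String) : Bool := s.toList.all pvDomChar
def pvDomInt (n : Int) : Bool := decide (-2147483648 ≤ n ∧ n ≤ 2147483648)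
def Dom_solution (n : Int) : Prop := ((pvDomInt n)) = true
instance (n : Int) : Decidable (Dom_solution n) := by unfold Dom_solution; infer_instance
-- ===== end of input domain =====

-- B replaces A's deque BFS (which emits 1..n in label order, with quadratic string
-- concatenation) by one join over the range 1..max(n,1); objective: faster.

-- ===== PORT A =====
-- `for nx in [v*2, v*2+1]: if nx > n: continue; deq.append(nx)`
def solChildStep (n : Int) (deq : List Int) (nx : Int) : List Int :=
  if nx > n then deq else deq ++ [nx]

-- the inner `for _ in range(length)` loop: pops `count` nodes, appends their kept children
def solInner (n : Int) (count : Nat) (deq : List Int) (answer : String) (L : Int) :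
    List Int × String × Int :=
  match count, deq with
  | 0, _ => (deq, answer, L)
  | Nat.succ _, [] => (deq, answer, L)  -- unreachable: Python never popleft()s an empty deque here
  | Nat.succ c, v :: rest =>
      solInner n c ([v * 2, v * 2 + 1].foldl (solChildStep n) rest)
        (answer ++ (PySem.Int.toStr v ++ " ")) (L + 1)

-- the outer `while deq` loop; fuel bounds the number of levels (n.toNat + 1 always suffices)
def solOuter (n : Int) (fuel : Nat) (deq : List Int) (answer : String) (L : Int) : String :=
  match fuel with
  | 0 => answer
  | Nat.succ f =>
      if deq.isEmpty then answer
      else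
        match solInner n deq.length deq answer L with
        | (d, a, l) => solOuter n f d a l

def solution (n : Int) : String := solOuter n (n.toNat + 1) [1] "" 0

-- ===== PORT B =====
def solution_alt (n : Int) : String :=
  PySem.Str.join ""
    ((PySem.List.pyRange 1 ((if n > 1 then n else 1) + 1) 1).map
      (fun i => PySem.Int.toStr i ++ " "))

-- ===== PRECONDITION & SPEC =====
def Spec_solution (n : Int) (out : String) : Prop := out = solution_alt n
instance (n : Int) (out : String) : Decidable (Spec_solution n out) := by unfold Spec_solution; infer_instance

-- ===== CLAIM (what is proved, stated in full; the proofs are below) =====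
def Claim_equal_solution : Prop := ∀ (n : Int), Dom_solution n → Spec_solution n (solution n)

-- ===== LEMMAS AND PROOFS =====

-- children of one node, as B-side range
def solChild (n v : Int) : List Int := [v * 2, v * 2 + 1].foldl (solChildStep n) []

-- "".join of the labels a..b-1, each followed by a space
def solJoin (a b : Int) : String :=
  PySem.Str.join "" ((PySem.List.pyRange a b 1).map (fun i => PySem.Int.toStr i ++ " "))

theorem join_empty_nil : PySem.Str.join "" ([] : List String) = "" := by
  simp [PySem.Str.join, PySem.Chars.join, List.intercalate]

theorem join_empty_cons (s : String) (l : List String) :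
    PySem.Str.join "" (s :: l) = s ++ PySem.Str.join "" l := by
  cases l with
  | nil => simp [PySem.Str.join, PySem.Chars.join, List.intercalate]
  | cons t l =>
    simp [PySem.Str.join, PySem.Chars.join, List.intercalate, String.ofList_append]

theorem join_empty_append (l₁ l₂ : List String) :
    PySem.Str.join "" (l₁ ++ l₂) = PySem.Str.join "" l₁ ++ PySem.Str.join "" l₂ := by
  induction l₁ with
  | nil => simp [join_empty_nil]
  | cons s l ih => simp [join_empty_cons, ih, String.append_assoc]

theorem solChildStep_foldl (n v : Int) (rest : List Int) :
    [v * 2, v * 2 + 1].foldl (solChildStep n) rest = rest ++ solChild n v := by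
  simp only [solChild, List.foldl, solChildStep]
  split_ifs <;> simp

theorem solChild_eq (n v : Int) :
    solChild n v = PySem.List.pyRange (v * 2) (min (v * 2 + 1) n + 1) 1 := by
  simp only [solChild, List.foldl, solChildStep]
  by_cases h1 : v * 2 > n
  · rw [if_pos h1, if_pos (by omega), PySem.List.pyRange_one_eq_nil (by omega)]
  · rw [if_neg h1]
    by_cases h2 : v * 2 + 1 > n
    · rw [if_pos h2, PySem.List.pyRange_one_cons (by omega),
        PySem.List.pyRange_one_eq_nil (by omega)]
      simp
    · rw [if_neg h2, PySem.List.pyRange_one_cons (by omega),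
        PySem.List.pyRange_one_cons (by omega), PySem.List.pyRange_one_eq_nil (by omega)]
      simp

theorem solInner_spec (n : Int) (q : List Int) :
    ∀ (extra : List Int) (ans : String) (L : Int),
      solInner n q.length (q ++ extra) ans L =
        (extra ++ q.flatMap (solChild n),
          ans ++ PySem.Str.join "" (q.map (fun v => PySem.Int.toStr v ++ " ")),
          L + q.length) := by
  induction q with
  | nil => intro extra ans L; simp [solInner, join_empty_nil]
  | cons v q ih =>
    intro extra ans L
    show solInner n (q.length + 1) (v :: (q ++ extra)) ans L = _
    rw [solInner, solChildStep_foldl, List.append_assoc]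
    rw [ih (extra ++ solChild n v)]
    simp [join_empty_cons, String.append_assoc]
    omega

theorem solOuter_nil (n : Int) (fuel : Nat) (ans : String) (L : Int) :
    solOuter n fuel [] ans L = ans := by
  cases fuel <;> simp [solOuter]

theorem flatMap_children (n b : Int) :
    ∀ (k : Nat) (a : Int), 1 ≤ a → a ≤ b + 1 → (b + 1 - a).toNat = k →
      (PySem.List.pyRange a (b + 1) 1).flatMap (solChild n) =
        PySem.List.pyRange (2 * a) (min (2 * b + 1) n + 1) 1 := by
  intro k
  induction k with
  | zero =>
    intro a ha hab hk
    have hab' : a = b + 1 := by omega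
    rw [PySem.List.pyRange_one_eq_nil (by omega), PySem.List.pyRange_one_eq_nil (by omega)]
    simp
  | succ k ih =>
    intro a ha hab hk
    have hlt : a ≤ b := by omega
    rw [PySem.List.pyRange_one_cons (by omega), List.flatMap_cons,
      ih (a + 1) (by omega) (by omega) (by omega), solChild_eq]
    by_cases h : a * 2 + 1 ≤ n
    · have h1 : min (a * 2 + 1) n = a * 2 + 1 := by omega
      have h2 : 2 * (a + 1) = a * 2 + 1 + 1 := by ring
      rw [h1, h2, ← PySem.List.pyRange_one_append (a * 2) (a * 2 + 1 + 1)
        (min (2 * b + 1) n + 1) (by omega) (by omega)]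
      have h3 : 2 * a = a * 2 := by ring
      rw [h3]
    · have h1 : min (a * 2 + 1) n = n := by omega
      have h2 : min (2 * b + 1) n = n := by omega
      rw [h1, h2, PySem.List.pyRange_one_eq_nil (show n + 1 ≤ 2 * (a + 1) by omega)]
      have h3 : 2 * a = a * 2 := by ring
      rw [h3]
      simp

theorem solOuter_range (n : Int) :
    ∀ (fuel : Nat) (a : Int) (ans : String) (L : Int),
      1 ≤ a → a ≤ n → (n - a).toNat < fuel →
      solOuter n fuel (PySem.List.pyRange a (min (2 * a - 1) n + 1) 1) ans L =
        ans ++ solJoin a (n + 1) := by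
  intro fuel
  induction fuel with
  | zero => intro a ans L ha han hk; omega
  | succ f ih =>
    intro a ans L ha han hk
    have hb1 : a < min (2 * a - 1) n + 1 := by omega
    have hinner := solInner_spec n (PySem.List.pyRange a (min (2 * a - 1) n + 1) 1) [] ans L
    rw [List.append_nil] at hinner
    rw [solOuter, if_neg (by rw [PySem.List.pyRange_one_cons hb1]; simp), hinner,
      List.nil_append,
      flatMap_children n (min (2 * a - 1) n) ((min (2 * a - 1) n + 1 - a).toNat) a ha
        (by omega) rfl]
    dsimp only
    by_cases h2 : 2 * a ≤ n
    · have e1 : min (2 * (min (2 * a - 1) n) + 1) n = min (2 * (2 * a) - 1) n := by omega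
      rw [e1, ih (2 * a) _ _ (by omega) (by omega) (by omega)]
      have e2 : min (2 * a - 1) n + 1 = 2 * a := by omega
      rw [String.append_assoc]
      congr 1
      simp only [solJoin]
      rw [e2, ← join_empty_append, ← List.map_append,
        ← PySem.List.pyRange_one_append a (2 * a) (n + 1) (by omega) (by omega)]
    · have e1 : min (2 * (min (2 * a - 1) n) + 1) n = n := by omega
      rw [e1, PySem.List.pyRange_one_eq_nil (show n + 1 ≤ 2 * a by omega), solOuter_nil]
      have e2 : min (2 * a - 1) n + 1 = n + 1 := by omega
      rw [e2]
      rfl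

theorem solution_eq (n : Int) : solution n = solution_alt n := by
  by_cases hn : 1 ≤ n
  · have h1 : PySem.List.pyRange 1 (min (2 * 1 - 1) n + 1) 1 = [1] := by
      have : min (2 * 1 - 1) n = 1 := by omega
      rw [this]
      exact PySem.List.pyRange_one_singleton 1
    have := solOuter_range n (n.toNat + 1) 1 "" 0 (by omega) hn (by omega)
    rw [h1] at this
    have hm : (if n > 1 then n else 1) = n := by split_ifs <;> omega
    rw [solution, this, String.empty_append, solution_alt, hm]
    rfl
  · have hfuel : n.toNat + 1 = 1 := by omega
    rw [solution, hfuel, solOuter, if_neg (by simp)]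
    have hinner := solInner_spec n [1] [] "" 0
    simp only [List.append_nil] at hinner
    rw [hinner]
    dsimp only
    have hch : [1 * 2, 1 * 2 + 1].foldl (solChildStep n) [] = [] := by
      simp only [List.foldl, solChildStep]
      rw [if_pos (by omega), if_pos (by omega)]
    simp only [solChild, hch, List.flatMap_cons, List.flatMap_nil, List.append_nil,
      List.nil_append, List.map_cons, List.map_nil, solOuter_nil]
    rw [join_empty_cons, join_empty_nil, solution_alt, if_neg (by omega)]
    rw [PySem.List.pyRange_one_cons (by omega), PySem.List.pyRange_one_eq_nil (by omega)]
    simp [join_empty_cons, join_empty_nil]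

-- ===== VERDICT (by name: the statement is the Claim_ definition above) =====
theorem solution_spec : Claim_equal_solution := by
  intro n _
  unfold Spec_solution
  exact solution_eq n
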